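-- pv_equiv track=rewrite | github.com/aymenmtar/ProjetFinal | Nouveau dossier/main_corrigé.py | _diviser_en_couches
-- ===== SOURCE A (Python) =====
-- def _diviser_en_couches(lignes):
--     couches = []
--     couche_actuelle = []
--
--     for ligne in lignes:
--         if ligne.startswith(';LAYER:'):
--             if couche_actuelle:
--                 couches.append(couche_actuelle)
--                 couche_actuelle = []
--         couche_actuelle.append(ligne)
--
--     if couche_actuelle:
--         couches.append(couche_actuelle)
--
--     return couches
-- ===== SOURCE B (Python) =====
-- def _prefixe_sans_marqueur(lignes):
--     # longest prefix containing no ';LAYER:' marker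
--     for i, l in enumerate(lignes):
--         if l.startswith(';LAYER:'):
--             return lignes[:i]
--     return lignes
--
-- def _diviser_en_couches(lignes):
--     # Recursive decomposition: the first group is the head line plus every
--     # following line up to (not including) the next marker; recurse on the rest.
--     if not lignes:
--         return []
--     corps = _prefixe_sans_marqueur(lignes[1:])
--     return [[lignes[0]] + corps] + _diviser_en_couches(lignes[1 + len(corps):])
-- ===== Notes on version B (the rewrite author's own statement) =====
-- stated objective: alternative
-- what changed: B replaces A's single forward pass with a flushed current-group accumulator by a recursion on the structure: it cuts off the first group (head line plus the marker-free prefix of the rest) and recurses on the remaining suffix.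
import Mathlib
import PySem

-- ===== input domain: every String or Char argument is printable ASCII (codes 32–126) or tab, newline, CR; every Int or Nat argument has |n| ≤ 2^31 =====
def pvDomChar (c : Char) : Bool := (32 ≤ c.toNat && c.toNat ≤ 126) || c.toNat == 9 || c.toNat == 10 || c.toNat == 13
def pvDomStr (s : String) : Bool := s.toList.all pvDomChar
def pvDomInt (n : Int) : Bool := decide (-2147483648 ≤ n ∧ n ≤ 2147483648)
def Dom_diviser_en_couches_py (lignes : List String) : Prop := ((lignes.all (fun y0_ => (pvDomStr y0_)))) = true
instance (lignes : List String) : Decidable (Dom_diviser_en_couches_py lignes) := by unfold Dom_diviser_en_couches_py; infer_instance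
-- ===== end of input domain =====

-- B: recursive decomposition — cut off the first group (head + marker-free prefix), recurse on the rest (alternative, same O(n) cost).

-- ===== PORT A =====
-- A's loop body: flush the current group before a marker, then append the line.
def stepA (st : List (List String) × List String) (ligne : String) :
    List (List String) × List String :=
  let st' := if PySem.Str.startswith ligne ";LAYER:" && !st.2.isEmpty
             then (st.1 ++ [st.2], ([] : List String)) else st
  (st'.1, st'.2 ++ [ligne])

def diviser_en_couches_py (lignes : List String) : List (List String) :=
  let st := lignes.foldl stepA ([], [])
  if !st.2.isEmpty then st.1 ++ [st.2] else st.1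

-- ===== PORT B =====
-- helper _prefixe_sans_marqueur: the prefix of the lines before the first marker
def prefixe_sans_marqueur : List String → List String
  | [] => []
  | l :: reste =>
    if PySem.Str.startswith l ";LAYER:" then []
    else l :: prefixe_sans_marqueur reste

def diviser_en_couches_py_alt (lignes : List String) : List (List String) :=
  match lignes with
  | [] => []
  | x :: xs =>
    (x :: prefixe_sans_marqueur xs)
      :: diviser_en_couches_py_alt ((x :: xs).drop (1 + (prefixe_sans_marqueur xs).length))
termination_by lignes.length
decreasing_by
  simp [List.length_drop]

-- ===== PRECONDITION & SPEC =====
def Spec_diviser_en_couches_py (lignes : List String) (out : List (List String)) : Prop := out = diviser_en_couches_py_alt lignes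
instance (lignes : List String) (out : List (List String)) : Decidable (Spec_diviser_en_couches_py lignes out) := by unfold Spec_diviser_en_couches_py; infer_instance

-- ===== CLAIM (what is proved, stated in full; the proofs are below) =====
def Claim_equal_diviser_en_couches_py : Prop := ∀ (lignes : List String), Dom_diviser_en_couches_py lignes → Spec_diviser_en_couches_py lignes (diviser_en_couches_py lignes)

-- ===== LEMMAS AND PROOFS =====

-- "keep" predicate: lines that do NOT start a new layer
def pKeep (l : String) : Bool := !(PySem.Str.startswith l ";LAYER:")

-- Reference characterisation: the groups, recursively from the front.
def groups : List String → List (List String)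
  | [] => []
  | x :: xs => (x :: xs.takeWhile pKeep) :: groups (xs.dropWhile pKeep)
termination_by l => l.length
decreasing_by
  have := List.length_dropWhile_le (p := pKeep) (l := xs)
  simp; omega

def groupsAux (cur : List String) (xs : List String) : List (List String) :=
  if cur.isEmpty then groups xs
  else (cur ++ xs.takeWhile pKeep) :: groups (xs.dropWhile pKeep)

lemma A_inv (xs : List String) : ∀ (cs : List (List String)) (cur : List String),
    (let st := xs.foldl stepA (cs, cur);
     if !st.2.isEmpty then st.1 ++ [st.2] else st.1) = cs ++ groupsAux cur xs := by
  induction xs with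
  | nil =>
    intro cs cur
    by_cases h : cur.isEmpty <;> simp [groupsAux, groups, h]
  | cons x xs ih =>
    intro cs cur
    rw [List.foldl_cons]
    by_cases hm : PySem.Chars.startswith x.toList [';', 'L', 'A', 'Y', 'E', 'R', ':']
    · by_cases hc : cur.isEmpty
      · have hst : stepA (cs, cur) x = (cs, cur ++ [x]) := by
          simp [stepA, hc]
        rw [hst, ih]
        have hcur : cur = [] := List.isEmpty_iff.mp hc
        subst hcur
        simp [groupsAux, groups]
      · have hst : stepA (cs, cur) x = (cs ++ [cur], [x]) := by
          simp [stepA, hm, hc]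
        rw [hst, ih]
        have ht : List.takeWhile pKeep (x :: xs) = [] := by
          simp [List.takeWhile, pKeep, hm]
        have hd : List.dropWhile pKeep (x :: xs) = x :: xs := by
          simp [List.dropWhile, pKeep, hm]
        simp only [groupsAux, hc, List.isEmpty_cons, if_false, Bool.false_eq_true, ht, hd]
        rw [groups]
        simp
    · have hst : stepA (cs, cur) x = (cs, cur ++ [x]) := by
        simp [stepA, hm]
      rw [hst, ih]
      have ht : List.takeWhile pKeep (x :: xs) = x :: List.takeWhile pKeep xs := by
        simp [List.takeWhile, pKeep, hm]
      have hd : List.dropWhile pKeep (x :: xs) = List.dropWhile pKeep xs := by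
        simp [List.dropWhile, pKeep, hm]
      by_cases hc : cur.isEmpty
      · have hcur : cur = [] := List.isEmpty_iff.mp hc
        subst hcur
        simp [groupsAux, groups]
      · simp [groupsAux, hc, ht, hd]

lemma A_eq_groups (lignes : List String) : diviser_en_couches_py lignes = groups lignes := by
  have := A_inv lignes [] []
  simpa [diviser_en_couches_py, groupsAux] using this

lemma prefixe_eq_takeWhile (xs : List String) :
    prefixe_sans_marqueur xs = xs.takeWhile pKeep := by
  induction xs with
  | nil => simp [prefixe_sans_marqueur]
  | cons x t ih =>
    by_cases hm : PySem.Chars.startswith x.toList [';', 'L', 'A', 'Y', 'E', 'R', ':'] <;>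
      simp [prefixe_sans_marqueur, List.takeWhile, pKeep, hm, ih]

lemma drop_len_takeWhile (xs : List String) :
    xs.drop (xs.takeWhile pKeep).length = xs.dropWhile pKeep := by
  induction xs with
  | nil => simp
  | cons x t ih =>
    by_cases h : pKeep x <;> simp [List.takeWhile, List.dropWhile, h, ih]

lemma B_eq_groups_bounded (n : Nat) : ∀ (lignes : List String), lignes.length ≤ n →
    diviser_en_couches_py_alt lignes = groups lignes := by
  induction n with
  | zero =>
    intro lignes h
    have : lignes = [] := List.eq_nil_of_length_eq_zero (Nat.le_zero.mp h)
    subst this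
    rw [diviser_en_couches_py_alt, groups]
  | succ n ih =>
    intro lignes h
    cases lignes with
    | nil => rw [diviser_en_couches_py_alt, groups]
    | cons x xs =>
      rw [diviser_en_couches_py_alt, groups]
      rw [prefixe_eq_takeWhile]
      have hdrop : (x :: xs).drop (1 + (xs.takeWhile pKeep).length)
          = xs.dropWhile pKeep := by
        have h1 : (1 + (xs.takeWhile pKeep).length) = (xs.takeWhile pKeep).length + 1 := by omega
        rw [h1]
        simpa using drop_len_takeWhile xs
      rw [hdrop]
      have hlen : (xs.dropWhile pKeep).length ≤ n := by
        have := List.length_dropWhile_le (p := pKeep) (l := xs)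
        simp at h; omega
      rw [ih _ hlen]

lemma B_eq_groups (lignes : List String) :
    diviser_en_couches_py_alt lignes = groups lignes :=
  B_eq_groups_bounded lignes.length lignes (le_refl _)

-- ===== VERDICT (by name: the statement is the Claim_ definition above) =====
theorem diviser_en_couches_py_spec : Claim_equal_diviser_en_couches_py := by
  intro lignes _
  unfold Spec_diviser_en_couches_py
  rw [A_eq_groups, B_eq_groups]
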